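-- pv_equiv track=rewrite | github.com/maneloy/hello-world | Exercises/AlgoyProg1/ej6_3.py | separar_cadena
-- ===== SOURCE A (Python) =====
-- def separar_cadena(cadena, sep, inserciones_maximas):
--     cadena_final = ""
--     contador = 0
--     maximo = 0
--     for letra in cadena:
--         if contador == len(cadena) - 1:
--             cadena_final += letra
--         elif maximo < inserciones_maximas:
--             maximo += 1
--             cadena_final += letra + sep
--         else:
--             cadena_final += letra
--         contador += 1
--     return cadena_final
-- ===== SOURCE B (Python) =====
-- def separar_cadena(cadena, sep, inserciones_maximas):
--     j = max(0, min(inserciones_maximas, len(cadena) - 1))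
--     return "".join(c + sep for c in cadena[:j]) + cadena[j:]
-- ===== Notes on version B (the rewrite author's own statement) =====
-- stated objective: simpler
-- what changed: Replaces the per-character counter/branch scan with a closed-form insertion count j = max(0, min(m, len-1)) followed by a slice-and-join construction.
import Mathlib
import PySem

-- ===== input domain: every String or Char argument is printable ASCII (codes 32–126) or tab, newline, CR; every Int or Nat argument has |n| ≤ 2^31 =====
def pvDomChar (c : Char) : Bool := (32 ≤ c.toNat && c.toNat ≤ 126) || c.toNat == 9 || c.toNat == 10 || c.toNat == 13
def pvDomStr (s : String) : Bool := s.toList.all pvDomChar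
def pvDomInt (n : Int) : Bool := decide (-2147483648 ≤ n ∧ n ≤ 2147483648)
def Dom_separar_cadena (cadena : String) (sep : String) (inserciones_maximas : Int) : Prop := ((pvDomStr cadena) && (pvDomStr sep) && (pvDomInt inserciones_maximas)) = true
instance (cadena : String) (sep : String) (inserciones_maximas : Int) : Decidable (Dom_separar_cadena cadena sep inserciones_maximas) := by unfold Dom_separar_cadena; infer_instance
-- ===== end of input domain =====

-- B replaces A's per-character counter/branch loop by a closed-form insertion count and a slice-and-join construction (simpler).

-- ===== PORT A =====
-- the for-loop of A with its state (cadena_final = acc, contador, maximo); n = len(cadena), fixed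
def sepGoA (n m : Int) (sep : List Char) : List Char → List Char → Int → Int → List Char
  | acc, [], _, _ => acc
  | acc, letra :: rest, contador, maximo =>
    if contador = n - 1 then
      sepGoA n m sep (acc ++ [letra]) rest (contador + 1) maximo
    else if maximo < m then
      sepGoA n m sep (acc ++ letra :: sep) rest (contador + 1) (maximo + 1)
    else
      sepGoA n m sep (acc ++ [letra]) rest (contador + 1) maximo

def separar_cadena (cadena : String) (sep : String) (inserciones_maximas : Int) : String :=
  String.ofList (sepGoA (cadena.toList.length : Int) inserciones_maximas sep.toList [] cadena.toList 0 0)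

-- ===== PORT B =====
-- j = max(0, min(inserciones_maximas, len(cadena)-1)); "".join(c + sep for c in cadena[:j]) + cadena[j:]
def separar_cadena_alt (cadena : String) (sep : String) (inserciones_maximas : Int) : String :=
  let cs := cadena.toList
  let j : Int := max 0 (min inserciones_maximas ((cs.length : Int) - 1))
  String.ofList ((PySem.List.slice cs none (some j)).flatMap (fun c => c :: sep.toList)
                 ++ PySem.List.slice cs (some j) none)

-- ===== PRECONDITION & SPEC =====
def Spec_separar_cadena (cadena : String) (sep : String) (inserciones_maximas : Int) (out : String) : Prop := out = separar_cadena_alt cadena sep inserciones_maximas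
instance (cadena : String) (sep : String) (inserciones_maximas : Int) (out : String) : Decidable (Spec_separar_cadena cadena sep inserciones_maximas out) := by unfold Spec_separar_cadena; infer_instance

-- ===== CLAIM (what is proved, stated in full; the proofs are below) =====
def Claim_equal_separar_cadena : Prop := ∀ (cadena : String) (sep : String) (inserciones_maximas : Int), Dom_separar_cadena cadena sep inserciones_maximas → Spec_separar_cadena cadena sep inserciones_maximas (separar_cadena cadena sep inserciones_maximas)

-- ===== LEMMAS AND PROOFS =====

-- loop invariant: after k characters (none of them the last), maximo = max 0 (min k m),
-- and the remaining loop appends sep after exactly the characters at global positions < jn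
theorem sepGoA_key (m : Int) (sep : List Char) (n : Nat) :
    ∀ (rest : List Char) (k : Nat) (acc : List Char), k + rest.length = n →
      sepGoA (n : Int) m sep acc rest (k : Int) (max 0 (min (k : Int) m))
        = acc ++ (rest.take ((max 0 (min m ((n : Int) - 1))).toNat - k)).flatMap (fun c => c :: sep)
              ++ rest.drop ((max 0 (min m ((n : Int) - 1))).toNat - k) := by
  intro rest
  induction rest with
  | nil =>
    intro k acc hk
    have hjn : (max 0 (min m ((n : Int) - 1))).toNat - k = 0 := by
      simp at hk; omega
    simp [sepGoA, hjn]
  | cons c rest ih =>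
    intro k acc hk
    simp only [List.length_cons] at hk
    set jn := (max 0 (min m ((n : Int) - 1))).toNat with hjndef
    by_cases hlast : (k : Int) = (n : Int) - 1
    · -- last character: rest = []
      have hrest : rest = [] := by
        have : rest.length = 0 := by omega
        simpa using this
      have hjk : jn - k = 0 := by omega
      subst hrest
      simp [sepGoA, hlast, hjk]
    · by_cases hins : (k : Int) < m
      · -- insert sep here
        have hmax : max 0 (min (k : Int) m) < m := by omega
        have hsucc : max 0 (min (k : Int) m) + 1 = max 0 (min ((k : Int) + 1) m) := by omega
        have hklt : k < jn := by omega
        have h1 : jn - k = (jn - (k + 1)) + 1 := by omega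
        have hIH := ih (k + 1) (acc ++ c :: sep) (by omega)
        push_cast at hIH
        simp only [sepGoA]
        rw [if_neg hlast, if_pos hmax, hsucc, hIH]
        simp [h1, List.flatMap_cons]
      · -- no sep: maximo has reached m (or m is nonpositive)
        have hmax : ¬ max 0 (min (k : Int) m) < m := by omega
        have hsame : max 0 (min (k : Int) m) = max 0 (min ((k : Int) + 1) m) := by omega
        have hjk : jn - k = 0 := by omega
        have hjk1 : jn - (k + 1) = 0 := by omega
        have hIH := ih (k + 1) (acc ++ [c]) (by omega)
        push_cast at hIH
        simp only [sepGoA]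
        rw [if_neg hlast, if_neg hmax, hsame, hIH]
        simp [hjk, hjk1]

-- ===== VERDICT (by name: the statement is the Claim_ definition above) =====
theorem separar_cadena_spec : Claim_equal_separar_cadena := by
  intro cadena sep m _
  unfold Spec_separar_cadena separar_cadena separar_cadena_alt
  show String.ofList (sepGoA ((cadena.toList.length : Int)) m sep.toList [] cadena.toList 0 0)
    = String.ofList ((PySem.List.slice cadena.toList none
          (some (max 0 (min m ((cadena.toList.length : Int) - 1))))).flatMap (fun c => c :: sep.toList)
        ++ PySem.List.slice cadena.toList
          (some (max 0 (min m ((cadena.toList.length : Int) - 1)))) none)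
  have hj0 : (0 : Int) ≤ max 0 (min m ((cadena.toList.length : Int) - 1)) := le_max_left _ _
  rw [PySem.List.slice_to _ hj0, PySem.List.slice_from _ hj0]
  have key := sepGoA_key m sep.toList cadena.toList.length cadena.toList 0 [] (by simp)
  rw [show max 0 (min ((0 : Nat) : Int) m) = 0 by omega] at key
  simp only [Nat.cast_zero, Nat.sub_zero] at key
  rw [key]
  simp
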